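-- pv_equiv track=rewrite | github.com/tuergeist/HackerRank | Algorithms/Strings/mars_exploration.py | calc
-- ===== SOURCE A (Python) =====
-- def calc(ins):
--     count = 0
--     assert len(ins) % 3 == 0
--     for i in range(0, len(ins) - 2, 3):
--         sub = ins[i:i+3]
--         if sub != 'SOS':
--             if sub[0] != 'S':
--                 count = count + 1
--             if sub[1] != 'O':
--                 count = count + 1
--             if sub[2] != 'S':
--                 count = count + 1
--     return count
-- ===== SOURCE B (Python) =====
-- def calc(ins):
--     assert len(ins) % 3 == 0
--     pat = "SOS"
--     return sum(1 for i, ch in enumerate(ins) if ch != pat[i % 3])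
-- ===== Notes on version B (the rewrite author's own statement) =====
-- stated objective: simpler
-- what changed: Replaces the chunk-of-3 loop with three hardcoded position checks by a single flat pass that compares each character to the expected pattern character at index i mod 3 and sums the mismatches.
import Mathlib
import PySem

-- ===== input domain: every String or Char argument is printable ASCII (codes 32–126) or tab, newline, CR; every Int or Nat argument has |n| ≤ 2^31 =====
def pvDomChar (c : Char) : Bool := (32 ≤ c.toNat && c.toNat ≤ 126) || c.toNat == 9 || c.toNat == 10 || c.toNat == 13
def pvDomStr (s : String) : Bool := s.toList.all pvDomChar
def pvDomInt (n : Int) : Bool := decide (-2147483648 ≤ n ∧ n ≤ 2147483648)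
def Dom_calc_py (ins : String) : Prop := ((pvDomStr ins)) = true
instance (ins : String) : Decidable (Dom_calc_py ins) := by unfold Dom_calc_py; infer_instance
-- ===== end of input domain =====

-- B replaces A's chunk-of-3 loop with three hardcoded position checks by one flat
-- character-wise pass comparing each char to "SOS"[i % 3] (simpler decomposition).


-- ===== PORT A =====
-- literal port of A; the assert is modeled by Pre_calc_py (A raises AssertionError when
-- len(ins) % 3 ≠ 0).  sub[0]/sub[1]/sub[2] are ported with pyGet? (none = IndexError;
-- unreachable here: every slice the loop takes has length 3).
def calc_py (ins : String) : Int :=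
  let l := ins.toList
  (PySem.List.pyRange 0 ((l.length : Int) - 2) 3).foldl
    (fun count i =>
      let sub := PySem.List.slice l (some i) (some (i + 3))
      if sub ≠ ['S', 'O', 'S'] then
        let c1 := if PySem.List.pyGet? sub 0 ≠ some 'S' then count + 1 else count
        let c2 := if PySem.List.pyGet? sub 1 ≠ some 'O' then c1 + 1 else c1
        if PySem.List.pyGet? sub 2 ≠ some 'S' then c2 + 1 else c2
      else count) 0

-- ===== PORT B =====
-- literal port of Source B; the assert is modeled by Pre_calc_py.
-- sum(1 for i, ch in enumerate(ins) if ch != "SOS"[i % 3])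
def calc_py_alt (ins : String) : Int :=
  ((PySem.List.enumerate ins.toList 0).countP
    (fun p => PySem.List.pyGet? ['S', 'O', 'S'] (PySem.Int.mod p.1 3) != some p.2) : Nat)

-- ===== PRECONDITION & SPEC =====
-- Pre_: both A and B assert len(ins) % 3 == 0 and raise AssertionError otherwise.
def Pre_calc_py (ins : String) : Prop := ins.toList.length % 3 = 0
instance (ins : String) : Decidable (Pre_calc_py ins) := by unfold Pre_calc_py; infer_instance
def pvWitness_calc_py : String := "SOSOSO"

def Spec_calc_py (ins : String) (out : Int) : Prop := out = calc_py_alt ins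
instance (ins : String) (out : Int) : Decidable (Spec_calc_py ins out) := by unfold Spec_calc_py; infer_instance

-- ===== CLAIM (what is proved, stated in full; the proofs are below) =====
def Claim_equal_calc_py : Prop := ∀ (ins : String), Dom_calc_py ins → Pre_calc_py ins → Spec_calc_py ins (calc_py ins)

-- ===== LEMMAS AND PROOFS =====

-- per-chunk mismatch cost (the value A adds for one 3-char slice)
def pvCost (sub : List Char) : Int :=
  (if PySem.List.pyGet? sub 0 ≠ some 'S' then 1 else 0) +
  (if PySem.List.pyGet? sub 1 ≠ some 'O' then 1 else 0) +
  (if PySem.List.pyGet? sub 2 ≠ some 'S' then 1 else 0)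

-- reference value: sum of chunk costs, three chars at a time
def pvCnt : List Char → Int
  | a :: b :: c :: t => pvCost [a, b, c] + pvCnt t
  | _ => 0

-- A's loop body adds exactly the chunk cost (the `sub = "SOS"` branch adds 0 anyway)
lemma pv_g_eq (l : List Char) (count i : Int) :
    (let sub := PySem.List.slice l (some i) (some (i + 3))
     if sub ≠ ['S', 'O', 'S'] then
       let c1 := if PySem.List.pyGet? sub 0 ≠ some 'S' then count + 1 else count
       let c2 := if PySem.List.pyGet? sub 1 ≠ some 'O' then c1 + 1 else c1
       if PySem.List.pyGet? sub 2 ≠ some 'S' then c2 + 1 else c2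
     else count) = count + pvCost (PySem.List.slice l (some i) (some (i + 3))) := by
  set sub := PySem.List.slice l (some i) (some (i + 3)) with hsub
  by_cases h : sub = ['S', 'O', 'S']
  · simp [h, pvCost, PySem.List.pyGet?, PySem.List.pyIdx?]
  · simp only [h, ne_eq, not_false_eq_true, if_pos, pvCost]
    split_ifs <;> ring

lemma pv_sumA : ∀ (k : Nat) (l : List Char), l.length = 3 * k →
    ((List.range k).map (fun j => pvCost ((l.drop (3 * j)).take 3))).sum = pvCnt l := by
  intro k
  induction k with
  | zero => intro l hl; simp at hl; simp [hl, pvCnt]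
  | succ k ih =>
    intro l hl
    match l with
    | a :: b :: c :: t =>
      rw [List.range_succ_eq_map]
      simp only [List.map_cons, List.map_map, List.sum_cons]
      have ht : t.length = 3 * k := by simp at hl; omega
      have hrw : ((List.range k).map ((fun j => pvCost (((a :: b :: c :: t).drop (3 * j)).take 3)) ∘ (fun j => j + 1)))
          = (List.range k).map (fun j => pvCost ((t.drop (3 * j)).take 3)) := by
        apply List.map_congr_left
        intro j _
        have h3 : 3 * (j + 1) = (3 * j) + 1 + 1 + 1 := by ring
        simp [Function.comp, h3, List.drop_succ_cons]
      rw [hrw, ih t ht]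
      simp [pvCnt]
    | [] => simp at hl
    | [a] => simp at hl; omega
    | [a, b] => simp at hl; omega

lemma pv_mod_step (s : Int) (h : PySem.Int.mod s 3 = 0) :
    PySem.Int.mod (s + 1) 3 = 1 ∧ PySem.Int.mod (s + 2) 3 = 2 ∧ PySem.Int.mod (s + 3) 3 = 0 := by
  rw [PySem.Int.mod_eq_emod_of_pos (by norm_num)] at h
  refine ⟨?_, ?_, ?_⟩ <;> rw [PySem.Int.mod_eq_emod_of_pos (by norm_num)] <;> omega

lemma pv_sumB : ∀ (k : Nat) (l : List Char) (s : Int), PySem.Int.mod s 3 = 0 → l.length = 3 * k →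
    (((PySem.List.enumerate l s).countP
      (fun p => PySem.List.pyGet? ['S', 'O', 'S'] (PySem.Int.mod p.1 3) != some p.2) : Nat) : Int)
      = pvCnt l := by
  intro k
  induction k with
  | zero => intro l s _ hl; simp at hl; simp [hl, pvCnt]
  | succ k ih =>
    intro l s hs hl
    match l with
    | a :: b :: c :: t =>
      obtain ⟨h1, h2, h3⟩ := pv_mod_step s hs
      have ht : t.length = 3 * k := by simp at hl; omega
      simp only [PySem.List.enumerate_cons, List.countP_cons]
      have := ih t (s + 1 + 1 + 1) (by convert h3 using 2; ring) ht
      push_cast [this]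
      have e2 : s + 1 + 1 = s + 2 := by ring
      rw [e2, h1, h2, hs]
      simp only [pvCnt, pvCost]
      simp only [PySem.List.pyGet?, PySem.List.pyIdx?]
      norm_num
      by_cases ha : a = 'S' <;> by_cases hb : b = 'O' <;> by_cases hc : c = 'S' <;>
        simp [ha, hb, hc, eq_comm] <;> ring
    | [] => simp at hl
    | [a] => simp at hl; omega
    | [a, b] => simp at hl; omega

lemma pv_main (ins : String) (hpre : ins.toList.length % 3 = 0) : calc_py ins = calc_py_alt ins := by
  set l := ins.toList with hl
  set n := l.length with hn
  obtain ⟨k, hk⟩ : ∃ k, n = 3 * k := ⟨n / 3, by omega⟩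
  have hB : calc_py_alt ins = pvCnt l := by
    unfold calc_py_alt
    exact pv_sumB k l 0 (by decide) hk
  have hA : calc_py ins = pvCnt l := by
    unfold calc_py
    simp only [← hl]
    have hg : (fun (count i : Int) =>
        let sub := PySem.List.slice l (some i) (some (i + 3))
        if sub ≠ ['S', 'O', 'S'] then
          let c1 := if PySem.List.pyGet? sub 0 ≠ some 'S' then count + 1 else count
          let c2 := if PySem.List.pyGet? sub 1 ≠ some 'O' then c1 + 1 else c1
          if PySem.List.pyGet? sub 2 ≠ some 'S' then c2 + 1 else c2
        else count)
        = fun (count i : Int) => count + pvCost (PySem.List.slice l (some i) (some (i + 3))) :=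
      funext fun c => funext fun i => pv_g_eq l c i
    rw [hg, PySem.List.foldl_add, PySem.List.pyRange_of_pos 0 ((n : Int) - 2) (by norm_num)]
    have hcnt : (if (0:Int) < (n:Int) - 2 then (((n:Int) - 2 - 0 + 3 - 1) / 3).toNat else 0) = k := by
      rcases Nat.eq_zero_or_pos k with h0 | hpos
      · subst h0; simp at hk; simp [hk]
      · rw [if_pos (by omega)]
        have : ((n:Int) - 2 - 0 + 3 - 1) = ((3 * k : Nat) : Int) := by push_cast [hk]; ring
        rw [this]
        rw [show ((3 * k : Nat) : Int) = 3 * (k : Int) by push_cast; ring,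
          Int.mul_ediv_cancel_left _ (by norm_num)]
        simp
    rw [hcnt, List.map_map, zero_add]
    have hmap : (List.range k).map ((fun i => pvCost (PySem.List.slice l (some i) (some (i + 3)))) ∘ (fun j : Nat => (0:Int) + 3 * (j:Int)))
        = (List.range k).map (fun j => pvCost ((l.drop (3 * j)).take 3)) := by
      apply List.map_congr_left
      intro j _
      have h1 : (0:Int) + 3 * (j:Int) = ((3 * j : Nat) : Int) := by push_cast; ring
      have h2 : ((3 * j : Nat) : Int) + 3 = ((3 * j + 3 : Nat) : Int) := by push_cast; ring
      simp only [Function.comp, h1, h2, PySem.List.slice_natCast]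
      have h3 : 3 * j + 3 - 3 * j = 3 := by omega
      rw [h3]
    rw [hmap]
    exact pv_sumA k l hk
  rw [hA, hB]

-- ===== VERDICT (by name: the statement is the Claim_ definition above) =====
theorem calc_py_spec : Claim_equal_calc_py := by
  intro ins _ hpre
  show calc_py ins = calc_py_alt ins
  exact pv_main ins hpre
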